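-- pv_equiv track=rewrite | github.com/MarkDunne/transformer-viz | app.py | calc_generation_flops
-- ===== SOURCE A (Python) =====
-- def calc_generation_flops(
--     n_layer: int,
--     n_head: int,
--     n_kv_head: int,
--     n_embd: int,
--     vocab_size: int,
--     prompt_len: int,
--     gen_tokens: int,
--     use_kv_cache: bool = True
-- ) -> int:
--     """
--     Calculate total FLOPs to generate tokens autoregressively.
--
--     Without KV cache: Must recompute K, V for ALL previous tokens at each step.
--     With KV cache: Only compute K, V for the new token, retrieve cached values.
--
--     The key insight:
--     - Without KV cache: generating token t requires a forward pass over all t tokens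
--       Total = sum(t for t in 1..N) = N(N+1)/2 token-passes
--     - With KV cache: generating token t requires forward pass for 1 new token
--       Total = N token-passes (but attention still looks at full context)
--     """
--     head_dim = n_embd // n_head
--
--     # FLOPs for projections (QKV + output + MLP + LM head) per token
--     # These scale with number of tokens processed
--     qkv_proj = n_embd * (n_embd + 2 * n_kv_head * head_dim)  # Q + K + V projections
--     attn_proj = n_embd * n_embd
--     mlp = 2 * n_embd * (4 * n_embd)  # up + down
--     lm_head = n_embd * vocab_size
--     proj_flops_per_token = 2 * n_layer * (qkv_proj + attn_proj + mlp) + 2 * lm_head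
--
--     # Attention FLOPs per layer: scales with context length
--     # Q @ K^T + attn @ V = 4 * d * context_len per token
--     def attn_flops_for_context(context_len: int) -> int:
--         return 4 * n_embd * context_len * n_layer
--
--     total_flops = 0
--
--     if use_kv_cache:
--         # With KV cache:
--         # - Prompt: process all prompt tokens at once (like training)
--         # - Generation: each new token only computes its own projections
--         #   but attention still looks at full context
--
--         # Prompt processing (prefill)
--         total_flops += prompt_len * proj_flops_per_token
--         total_flops += prompt_len * attn_flops_for_context(prompt_len // 2)  # avg context
--
--         # Generation: 1 new token at a time
--         for i in range(gen_tokens):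
--             context_len = prompt_len + i + 1
--             total_flops += proj_flops_per_token  # only 1 token's projections
--             total_flops += attn_flops_for_context(context_len)  # attention over full context
--     else:
--         # Without KV cache:
--         # Must recompute everything from scratch at each step
--         for i in range(gen_tokens):
--             context_len = prompt_len + i + 1
--             # Process ALL tokens (prompt + generated so far)
--             total_flops += context_len * proj_flops_per_token
--             total_flops += context_len * attn_flops_for_context(context_len // 2)
--
--     return total_flops
-- ===== SOURCE B (Python) =====
-- def _tri(n):
--     # sum 1..n (telescoping prefix; exact integer division)
--     return n * (n + 1) // 2
--
--
-- def _G(n):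
--     # prefix antiderivative of t*(t//2): G(n) - G(n-1) == n*(n//2) for every int n
--     return (n * (n + 1) * (2 * n + 1) // 6 - ((n + 1) // 2) ** 2) // 2
--
--
-- def calc_generation_flops(
--     n_layer: int,
--     n_head: int,
--     n_kv_head: int,
--     n_embd: int,
--     vocab_size: int,
--     prompt_len: int,
--     gen_tokens: int,
--     use_kv_cache: bool = True,
-- ) -> int:
--     """Closed-form (O(1)) FLOP total: replaces the per-token loop with arithmetic series."""
--     head_dim = n_embd // n_head
--     proj = 2 * n_layer * (
--         n_embd * (n_embd + 2 * n_kv_head * head_dim)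
--         + n_embd * n_embd
--         + 8 * n_embd * n_embd
--     ) + 2 * n_embd * vocab_size
--     attn_coeff = 4 * n_embd * n_layer
--     g = gen_tokens if gen_tokens > 0 else 0
--     L = prompt_len
--     ctx_sum = g * L + _tri(g)  # sum of contexts L+1 .. L+g
--     if use_kv_cache:
--         return L * proj + attn_coeff * L * (L // 2) + g * proj + attn_coeff * ctx_sum
--     else:
--         return proj * ctx_sum + attn_coeff * (_G(L + g) - _G(L))
-- ===== Notes on version B (the rewrite author's own statement) =====
-- stated objective: faster
-- what changed: Replaced the per-generated-token Python loop with closed-form arithmetic series; the floor-division sum over contexts (context*(context//2)) is evaluated exactly via a telescoping integer antiderivative, so B does O(1) arithmetic instead of O(gen_tokens) iterations.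
import Mathlib
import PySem

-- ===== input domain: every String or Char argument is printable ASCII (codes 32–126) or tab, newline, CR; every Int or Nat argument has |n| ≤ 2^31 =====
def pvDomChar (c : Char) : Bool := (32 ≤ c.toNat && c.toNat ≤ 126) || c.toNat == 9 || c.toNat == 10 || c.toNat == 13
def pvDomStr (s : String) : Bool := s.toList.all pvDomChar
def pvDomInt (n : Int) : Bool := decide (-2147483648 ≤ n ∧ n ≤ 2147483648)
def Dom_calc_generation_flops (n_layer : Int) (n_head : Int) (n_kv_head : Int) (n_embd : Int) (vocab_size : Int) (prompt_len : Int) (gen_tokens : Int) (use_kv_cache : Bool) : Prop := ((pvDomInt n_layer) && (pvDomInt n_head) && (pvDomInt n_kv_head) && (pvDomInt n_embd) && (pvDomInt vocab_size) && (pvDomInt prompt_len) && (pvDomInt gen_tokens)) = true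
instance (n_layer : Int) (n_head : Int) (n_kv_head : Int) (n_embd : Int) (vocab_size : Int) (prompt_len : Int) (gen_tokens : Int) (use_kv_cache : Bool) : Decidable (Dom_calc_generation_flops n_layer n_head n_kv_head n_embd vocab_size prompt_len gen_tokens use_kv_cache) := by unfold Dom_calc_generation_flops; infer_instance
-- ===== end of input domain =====

-- ===== PORT A =====
-- B replaces A's per-token generation loop by closed-form arithmetic series (objective: faster).
def calc_generation_flops (n_layer : Int) (n_head : Int) (n_kv_head : Int) (n_embd : Int) (vocab_size : Int) (prompt_len : Int) (gen_tokens : Int) (use_kv_cache : Bool) : Int :=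
  let head_dim := PySem.Int.floordiv n_embd n_head
  let qkv_proj := n_embd * (n_embd + 2 * n_kv_head * head_dim)
  let attn_proj := n_embd * n_embd
  let mlp := 2 * n_embd * (4 * n_embd)
  let lm_head := n_embd * vocab_size
  let proj_flops_per_token := 2 * n_layer * (qkv_proj + attn_proj + mlp) + 2 * lm_head
  let attn_flops_for_context := fun (context_len : Int) => 4 * n_embd * context_len * n_layer
  if use_kv_cache then
    let total := 0 + prompt_len * proj_flops_per_token
      + prompt_len * attn_flops_for_context (PySem.Int.floordiv prompt_len 2)
    (PySem.List.pyRange 0 gen_tokens 1).foldl (fun total_flops i =>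
      let context_len := prompt_len + i + 1
      total_flops + proj_flops_per_token + attn_flops_for_context context_len) total
  else
    (PySem.List.pyRange 0 gen_tokens 1).foldl (fun total_flops i =>
      let context_len := prompt_len + i + 1
      total_flops + context_len * proj_flops_per_token
        + context_len * attn_flops_for_context (PySem.Int.floordiv context_len 2)) 0

-- ===== PORT B =====
-- sum 1..n (telescoping prefix; exact integer division)
def pvTri (n : Int) : Int := PySem.Int.floordiv (n * (n + 1)) 2

-- prefix antiderivative of t*(t//2): pvG n - pvG (n-1) = n * (n // 2) for every Int n
def pvG (n : Int) : Int :=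
  PySem.Int.floordiv
    (PySem.Int.floordiv (n * (n + 1) * (2 * n + 1)) 6 - (PySem.Int.floordiv (n + 1) 2) ^ 2) 2

def calc_generation_flops_alt (n_layer : Int) (n_head : Int) (n_kv_head : Int) (n_embd : Int) (vocab_size : Int) (prompt_len : Int) (gen_tokens : Int) (use_kv_cache : Bool) : Int :=
  let head_dim := PySem.Int.floordiv n_embd n_head
  let proj := 2 * n_layer * (n_embd * (n_embd + 2 * n_kv_head * head_dim)
      + n_embd * n_embd + 8 * n_embd * n_embd) + 2 * n_embd * vocab_size
  let attn_coeff := 4 * n_embd * n_layer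
  let g := if gen_tokens > 0 then gen_tokens else 0
  let L := prompt_len
  let ctx_sum := g * L + pvTri g
  if use_kv_cache then
    L * proj + attn_coeff * L * (PySem.Int.floordiv L 2) + g * proj + attn_coeff * ctx_sum
  else
    proj * ctx_sum + attn_coeff * (pvG (L + g) - pvG L)

-- ===== PRECONDITION & SPEC =====
-- Pre_ excludes n_head = 0, on which A raises ZeroDivisionError (n_embd // n_head).
def Pre_calc_generation_flops (n_layer : Int) (n_head : Int) (n_kv_head : Int) (n_embd : Int) (vocab_size : Int) (prompt_len : Int) (gen_tokens : Int) (use_kv_cache : Bool) : Prop := n_head ≠ 0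
instance (n_layer : Int) (n_head : Int) (n_kv_head : Int) (n_embd : Int) (vocab_size : Int) (prompt_len : Int) (gen_tokens : Int) (use_kv_cache : Bool) : Decidable (Pre_calc_generation_flops n_layer n_head n_kv_head n_embd vocab_size prompt_len gen_tokens use_kv_cache) := by unfold Pre_calc_generation_flops; infer_instance
def pvWitness_calc_generation_flops : Int × Int × Int × Int × Int × Int × Int × Bool := (2, 4, 2, 8, 11, 3, 5, false)
def Spec_calc_generation_flops (n_layer : Int) (n_head : Int) (n_kv_head : Int) (n_embd : Int) (vocab_size : Int) (prompt_len : Int) (gen_tokens : Int) (use_kv_cache : Bool) (out : Int) : Prop := out = calc_generation_flops_alt n_layer n_head n_kv_head n_embd vocab_size prompt_len gen_tokens use_kv_cache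
instance (n_layer : Int) (n_head : Int) (n_kv_head : Int) (n_embd : Int) (vocab_size : Int) (prompt_len : Int) (gen_tokens : Int) (use_kv_cache : Bool) (out : Int) : Decidable (Spec_calc_generation_flops n_layer n_head n_kv_head n_embd vocab_size prompt_len gen_tokens use_kv_cache out) := by unfold Spec_calc_generation_flops; infer_instance

-- ===== CLAIM (what is proved, stated in full; the proofs are below) =====
def Claim_equal_calc_generation_flops : Prop := ∀ (n_layer : Int) (n_head : Int) (n_kv_head : Int) (n_embd : Int) (vocab_size : Int) (prompt_len : Int) (gen_tokens : Int) (use_kv_cache : Bool), Dom_calc_generation_flops n_layer n_head n_kv_head n_embd vocab_size prompt_len gen_tokens use_kv_cache → Pre_calc_generation_flops n_layer n_head n_kv_head n_embd vocab_size prompt_len gen_tokens use_kv_cache → Spec_calc_generation_flops n_layer n_head n_kv_head n_embd vocab_size prompt_len gen_tokens use_kv_cache (calc_generation_flops n_layer n_head n_kv_head n_embd vocab_size prompt_len gen_tokens use_kv_cache)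

-- ===== LEMMAS AND PROOFS =====
lemma pvFdivHelper (a c k s : Int) (hc : 0 < c) (h : a = c * k + s) (h0 : 0 ≤ s) (h1 : s < c) :
    PySem.Int.floordiv a c = k := by
  rw [PySem.Int.floordiv_eq_iff_of_pos hc]
  constructor <;> nlinarith

lemma pvSixDvd (n : Int) : (6 : Int) ∣ n * (n + 1) * (2 * n + 1) := by
  obtain ⟨q, r, hn, hr0, hr5⟩ : ∃ q r, n = 6 * q + r ∧ 0 ≤ r ∧ r < 6 :=
    ⟨PySem.Int.floordiv n 6, PySem.Int.mod n 6,
      by have := PySem.Int.floordiv_mul_add_mod n 6; omega,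
      PySem.Int.mod_nonneg n (by norm_num), PySem.Int.mod_lt n (by norm_num)⟩
  interval_cases r <;> subst hn
  · exact ⟨q * (6 * q + 1) * (12 * q + 1), by ring⟩
  · exact ⟨(6 * q + 1) * (3 * q + 1) * (4 * q + 1), by ring⟩
  · exact ⟨(3 * q + 1) * (2 * q + 1) * (12 * q + 5), by ring⟩
  · exact ⟨(2 * q + 1) * (3 * q + 2) * (12 * q + 7), by ring⟩
  · exact ⟨(3 * q + 2) * (6 * q + 5) * (4 * q + 3), by ring⟩
  · exact ⟨(6 * q + 5) * (q + 1) * (12 * q + 11), by ring⟩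

lemma pvFdivDvd (a c : Int) (hc : 0 < c) (h : c ∣ a) : c * PySem.Int.floordiv a c = a := by
  obtain ⟨k, hk⟩ := h
  rw [hk, pvFdivHelper (c * k) c k 0 hc (by ring) le_rfl hc]

lemma pvTri_succ (n : Int) : pvTri (n + 1) = pvTri n + (n + 1) := by
  obtain ⟨k, hk⟩ : ∃ k, n * (n + 1) = 2 * k := (Int.even_mul_succ_self n).elim fun r hr => ⟨r, by omega⟩
  unfold pvTri
  rw [pvFdivHelper (n * (n + 1)) 2 k 0 (by norm_num) (by omega) le_rfl (by norm_num),
      pvFdivHelper ((n + 1) * (n + 1 + 1)) 2 (k + n + 1) 0 (by norm_num) (by linear_combination hk) le_rfl (by norm_num)]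
  ring

lemma pvG_succ (n : Int) :
    pvG (n + 1) = pvG n + (n + 1) * PySem.Int.floordiv (n + 1) 2 := by
  unfold pvG
  set p1 := PySem.Int.floordiv ((n + 1) * (n + 1 + 1) * (2 * (n + 1) + 1)) 6 with hp1def
  set p0 := PySem.Int.floordiv (n * (n + 1) * (2 * n + 1)) 6 with hp0def
  set a1 := PySem.Int.floordiv (n + 1 + 1) 2 with ha1def
  set a0 := PySem.Int.floordiv (n + 1) 2 with ha0def
  have hp1 : 6 * p1 = (n + 1) * (n + 1 + 1) * (2 * (n + 1) + 1) :=
    pvFdivDvd _ 6 (by norm_num) (pvSixDvd (n + 1))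
  have hp0 : 6 * p0 = n * (n + 1) * (2 * n + 1) := pvFdivDvd _ 6 (by norm_num) (pvSixDvd n)
  have hE3 : p1 - p0 = (n + 1) * (n + 1) := by
    have h6 : 6 * (p1 - p0) = 6 * ((n + 1) * (n + 1)) := by linear_combination hp1 - hp0
    exact mul_left_cancel₀ (by norm_num) h6
  have ha1 : 2 * a1 + PySem.Int.mod (n + 1 + 1) 2 = n + 1 + 1 := by
    have := PySem.Int.floordiv_mul_add_mod (n + 1 + 1) 2; omega
  have ha0 : 2 * a0 + PySem.Int.mod (n + 1) 2 = n + 1 := by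
    have := PySem.Int.floordiv_mul_add_mod (n + 1) 2; omega
  have hm1 : 0 ≤ PySem.Int.mod (n + 1 + 1) 2 ∧ PySem.Int.mod (n + 1 + 1) 2 < 2 :=
    ⟨PySem.Int.mod_nonneg _ (by norm_num), PySem.Int.mod_lt _ (by norm_num)⟩
  have hm0 : 0 ≤ PySem.Int.mod (n + 1) 2 ∧ PySem.Int.mod (n + 1) 2 < 2 :=
    ⟨PySem.Int.mod_nonneg _ (by norm_num), PySem.Int.mod_lt _ (by norm_num)⟩
  set G1 := PySem.Int.floordiv (p1 - a1 ^ 2) 2 with hG1def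
  set G0 := PySem.Int.floordiv (p0 - a0 ^ 2) 2 with hG0def
  have hg1 : 2 * G1 + PySem.Int.mod (p1 - a1 ^ 2) 2 = p1 - a1 ^ 2 := by
    have := PySem.Int.floordiv_mul_add_mod (p1 - a1 ^ 2) 2; omega
  have hg0 : 2 * G0 + PySem.Int.mod (p0 - a0 ^ 2) 2 = p0 - a0 ^ 2 := by
    have := PySem.Int.floordiv_mul_add_mod (p0 - a0 ^ 2) 2; omega
  have hs1 : 0 ≤ PySem.Int.mod (p1 - a1 ^ 2) 2 ∧ PySem.Int.mod (p1 - a1 ^ 2) 2 < 2 :=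
    ⟨PySem.Int.mod_nonneg _ (by norm_num), PySem.Int.mod_lt _ (by norm_num)⟩
  have hs0 : 0 ≤ PySem.Int.mod (p0 - a0 ^ 2) 2 ∧ PySem.Int.mod (p0 - a0 ^ 2) 2 < 2 :=
    ⟨PySem.Int.mod_nonneg _ (by norm_num), PySem.Int.mod_lt _ (by norm_num)⟩
  rcases Int.even_or_odd n with ⟨m, hm⟩ | ⟨m, hm⟩
  · -- n = m + m : n+1 odd, a0 = m, a1 = m+1
    have ha0v : a0 = m := by omega
    have ha1v : a1 = m + 1 := by omega
    have hA1sq : a1 ^ 2 = (m + 1) ^ 2 := by rw [ha1v]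
    have hA0sq : a0 ^ 2 = m ^ 2 := by rw [ha0v]
    have key : 2 * G1 - 2 * G0 - 2 * ((n + 1) * a0) =
        PySem.Int.mod (p0 - a0 ^ 2) 2 - PySem.Int.mod (p1 - a1 ^ 2) 2 := by
      linear_combination hg1 - hg0 + hE3 - hA1sq + hA0sq - 2 * (n + 1) * ha0v + (n + 2) * hm
    set X := (n + 1) * a0
    omega
  · -- n = 2m+1 : n+1 even, a0 = a1 = m+1
    have ha0v : a0 = m + 1 := by omega
    have ha1v : a1 = m + 1 := by omega
    have hA1sq : a1 ^ 2 = (m + 1) ^ 2 := by rw [ha1v]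
    have hA0sq : a0 ^ 2 = (m + 1) ^ 2 := by rw [ha0v]
    have key : 2 * G1 - 2 * G0 - 2 * ((n + 1) * a0) =
        PySem.Int.mod (p0 - a0 ^ 2) 2 - PySem.Int.mod (p1 - a1 ^ 2) 2 := by
      linear_combination hg1 - hg0 + hE3 - hA1sq + hA0sq - 2 * (n + 1) * ha0v + (n + 1) * hm
    set X := (n + 1) * a0
    omega

lemma pvTri_zero : pvTri 0 = 0 := by decide

lemma pvRange_cast (g : Nat) :
    PySem.List.pyRange 0 (g : Int) 1 = (List.range g).map (fun (k : Nat) => (k : Int)) := by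
  rw [PySem.List.pyRange_one]
  have h : ((g : Int) - 0).toNat = g := by omega
  rw [h]
  apply List.map_congr_left
  intro a _
  omega

lemma pvLoopKV (e nl P L t0 : Int) (g : Nat) :
    (List.range g).foldl
      (fun (total : Int) (i : Nat) => total + P + 4 * e * (L + (i : Int) + 1) * nl) t0
    = t0 + g * P + 4 * e * nl * ((g : Int) * L + pvTri g) := by
  induction g with
  | zero => simp [pvTri_zero]
  | succ m ih =>
      rw [List.range_succ, List.foldl_append, ih]
      have hT := pvTri_succ (m : Int)
      simp only [List.foldl_cons, List.foldl_nil]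
      push_cast [hT]
      ring

lemma pvLoopNoKV (e nl P L : Int) (g : Nat) :
    (List.range g).foldl
      (fun (total : Int) (i : Nat) => total + (L + (i : Int) + 1) * P
        + (L + (i : Int) + 1) * (4 * e * PySem.Int.floordiv (L + (i : Int) + 1) 2 * nl)) 0
    = P * ((g : Int) * L + pvTri g) + 4 * e * nl * (pvG (L + g) - pvG L) := by
  induction g with
  | zero => simp [pvTri_zero]
  | succ m ih =>
      rw [List.range_succ, List.foldl_append, ih]
      have hG := pvG_succ (L + m)
      have hT := pvTri_succ (m : Int)
      simp only [List.foldl_cons, List.foldl_nil]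
      push_cast
      push_cast at hG hT
      rw [show L + ((m : Int) + 1) = L + (m : Int) + 1 from by ring]
      linear_combination (-P) * hT - 4 * e * nl * hG

lemma pvRangeNeg (gen_tokens : Int) (h : ¬ 0 < gen_tokens) :
    PySem.List.pyRange 0 gen_tokens 1 = [] := by
  rw [PySem.List.pyRange_one]
  have h0 : (gen_tokens - 0).toNat = 0 := by omega
  rw [h0]
  simp

-- ===== VERDICT (by name: the statement is the Claim_ definition above) =====
theorem calc_generation_flops_spec : Claim_equal_calc_generation_flops := by
  intro n_layer n_head n_kv_head n_embd vocab_size prompt_len gen_tokens use_kv_cache _ _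
  unfold Spec_calc_generation_flops calc_generation_flops calc_generation_flops_alt
  have hrange : PySem.List.pyRange 0 gen_tokens 1
      = (List.range gen_tokens.toNat).map (fun (k : Nat) => (k : Int)) := by
    by_cases hg : 0 < gen_tokens
    · have h1 : ((gen_tokens.toNat : Nat) : Int) = gen_tokens := by omega
      rw [← h1, pvRange_cast]
      have h2 : ((gen_tokens.toNat : Int)).toNat = gen_tokens.toNat := by omega
      rw [h2]
    · rw [pvRangeNeg gen_tokens hg]
      have h0 : gen_tokens.toNat = 0 := by omega
      rw [h0]
      simp
  have hgi : (if gen_tokens > 0 then gen_tokens else 0) = ((gen_tokens.toNat : Nat) : Int) := by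
    split <;> omega
  rw [hrange, hgi]
  cases use_kv_cache with
  | true =>
      rw [if_pos rfl, if_pos rfl]
      rw [List.foldl_map, pvLoopKV]
      ring
  | false =>
      rw [if_neg Bool.false_ne_true, if_neg Bool.false_ne_true]
      rw [List.foldl_map, pvLoopNoKV]
      ring
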